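-- pv_equiv track=rewrite | github.com/alfatti/CM_thoughts | knn_ablation.py | _resolve_groups
-- ===== SOURCE A (Python) =====
-- from typing import Dict, List, Tuple
--
-- def _resolve_groups(columns: List[str]) -> Dict[str, List[str]]:
--     """
--     Dynamically assign every feature column to exactly one group,
--     based on the slim-pipeline naming convention.
--     Returns {group_name: [col, ...]} keeping only columns present in data.
--     """
--     def pick(patterns):
--         return [c for c in columns if any(c.startswith(p) or p in c for p in patterns)]
--
--     # Order matters — more specific patterns first
--     groups = {
--         "AMOUNT":    pick(["amt_", "is_round_amount"]),
--         "RECEIVER":  pick(["recv_"]),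
--         "PORTFOLIO": pick(["port_", "tx_share_of_daily_vol", "vol_7d_vs_30d"]),
--         "TEMPORAL":  pick(["is_weekend", "is_off_hours", "seconds_since_last_tx",
--                            "gap_zscore", "tx_count_24h", "velocity_7d_vs_30d"]),
--         "CURRENCY":  pick(["ccy_", "currency_switched"]),
--         "COMPOSITE": pick(["flag_"]),
--     }
--
--     # Remove tx_count columns from AMOUNT (they measure activity, not amount anomaly)
--     # and expose as their own group so we can test them independently
--     tx_count_cols = [c for c in groups["AMOUNT"] if c.endswith("_tx_count")]
--     groups["AMOUNT"]   = [c for c in groups["AMOUNT"] if c not in tx_count_cols]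
--     groups["TX_COUNT"] = tx_count_cols
--
--     # Deduplicate: if a column matches multiple groups keep the first match
--     seen = set()
--     for name in list(groups):
--         groups[name] = [c for c in groups[name] if c not in seen]
--         seen.update(groups[name])
--         if not groups[name]:
--             del groups[name]
--
--     return groups
-- ===== SOURCE B (Python) =====
-- def _resolve_groups(columns):
--     def has_any(c, pats):
--         return any(p in c for p in pats)
--
--     rules = [
--         ("AMOUNT",    lambda c: has_any(c, ["amt_", "is_round_amount"]) and not c.endswith("_tx_count")),
--         ("RECEIVER",  lambda c: has_any(c, ["recv_"])),
--         ("PORTFOLIO", lambda c: has_any(c, ["port_", "tx_share_of_daily_vol", "vol_7d_vs_30d"])),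
--         ("TEMPORAL",  lambda c: has_any(c, ["is_weekend", "is_off_hours", "seconds_since_last_tx",
--                                             "gap_zscore", "tx_count_24h", "velocity_7d_vs_30d"])),
--         ("CURRENCY",  lambda c: has_any(c, ["ccy_", "currency_switched"])),
--         ("COMPOSITE", lambda c: has_any(c, ["flag_"])),
--         ("TX_COUNT",  lambda c: has_any(c, ["amt_", "is_round_amount"]) and c.endswith("_tx_count")),
--     ]
--     buckets = {name: [] for name, _ in rules}
--     for c in columns:
--         for name, pred in rules:
--             if pred(c):
--                 buckets[name].append(c)
--                 break
--     return {name: cols for name, cols in buckets.items() if cols}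
-- ===== Notes on version B (the rewrite author's own statement) =====
-- stated objective: simpler
-- what changed: Replaces A's per-group scans plus a separate tx_count reclassification pass and a seen-set dedup loop by a single pass over the columns that appends each column to the first group in a fixed (name, predicate) priority list, with AMOUNT excluding _tx_count columns and TX_COUNT last, then drops empty groups.
import Mathlib
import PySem

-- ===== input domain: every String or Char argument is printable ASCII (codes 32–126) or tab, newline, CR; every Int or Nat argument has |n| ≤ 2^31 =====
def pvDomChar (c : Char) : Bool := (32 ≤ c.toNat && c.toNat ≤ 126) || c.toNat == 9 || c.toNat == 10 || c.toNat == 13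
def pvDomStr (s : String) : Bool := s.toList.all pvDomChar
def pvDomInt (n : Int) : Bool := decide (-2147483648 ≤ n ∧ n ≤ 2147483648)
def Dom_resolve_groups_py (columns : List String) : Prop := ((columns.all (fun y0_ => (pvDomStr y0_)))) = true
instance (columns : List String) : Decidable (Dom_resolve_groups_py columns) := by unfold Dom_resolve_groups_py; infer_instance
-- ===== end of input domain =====

-- B replaces A's per-group scans, tx_count reclassification pass and seen-set dedup loop by one
-- pass over the columns assigning each column to the first matching group in a fixed priority list
-- (objective: simpler, same asymptotic cost).

-- ===== PORT A =====
def pvPick (columns pats : List String) : List String :=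
  columns.filter (fun c => pats.any (fun p => PySem.Str.startswith c p || PySem.Str.isIn p c))

-- one iteration of A's dedup loop 'for name in list(groups): …'
def pvDedupStep (st : PySem.Dict String (List String) × PySem.Set String) (name : String) :
    PySem.Dict String (List String) × PySem.Set String :=
  let kept := (st.1.getD name []).filter (fun c => !(PySem.Set.contains st.2 c))
  let seen := PySem.Set.update st.2 kept
  let g := st.1.insert name kept
  if kept.isEmpty then (g.erase name, seen) else (g, seen)

def resolve_groups_py (columns : List String) : List (String × List String) :=
  let groups : PySem.Dict String (List String) :=
    (((((PySem.Dict.empty.insert "AMOUNT" (pvPick columns ["amt_", "is_round_amount"])).insert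
      "RECEIVER" (pvPick columns ["recv_"])).insert
      "PORTFOLIO" (pvPick columns ["port_", "tx_share_of_daily_vol", "vol_7d_vs_30d"])).insert
      "TEMPORAL" (pvPick columns ["is_weekend", "is_off_hours", "seconds_since_last_tx",
                                  "gap_zscore", "tx_count_24h", "velocity_7d_vs_30d"])).insert
      "CURRENCY" (pvPick columns ["ccy_", "currency_switched"])).insert
      "COMPOSITE" (pvPick columns ["flag_"])
  let tx_count_cols := (groups.getD "AMOUNT" []).filter (fun c => PySem.Str.endswith c "_tx_count")
  let groups := groups.insert "AMOUNT"
      ((groups.getD "AMOUNT" []).filter (fun c => !(tx_count_cols.contains c)))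
  let groups := groups.insert "TX_COUNT" tx_count_cols
  (groups.keys.foldl pvDedupStep (groups, PySem.Set.empty)).1.items

-- ===== PORT B =====
def pvHasAny (c : String) (pats : List String) : Bool := pats.any (fun p => PySem.Str.isIn p c)

def pvPredAmount (c : String) : Bool :=
  pvHasAny c ["amt_", "is_round_amount"] && !PySem.Str.endswith c "_tx_count"
def pvPredReceiver (c : String) : Bool := pvHasAny c ["recv_"]
def pvPredPortfolio (c : String) : Bool :=
  pvHasAny c ["port_", "tx_share_of_daily_vol", "vol_7d_vs_30d"]
def pvPredTemporal (c : String) : Bool :=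
  pvHasAny c ["is_weekend", "is_off_hours", "seconds_since_last_tx",
              "gap_zscore", "tx_count_24h", "velocity_7d_vs_30d"]
def pvPredCurrency (c : String) : Bool := pvHasAny c ["ccy_", "currency_switched"]
def pvPredComposite (c : String) : Bool := pvHasAny c ["flag_"]
def pvPredTxCount (c : String) : Bool :=
  pvHasAny c ["amt_", "is_round_amount"] && PySem.Str.endswith c "_tx_count"

def pvRules : List (String × (String → Bool)) :=
  [("AMOUNT", pvPredAmount), ("RECEIVER", pvPredReceiver), ("PORTFOLIO", pvPredPortfolio),
   ("TEMPORAL", pvPredTemporal), ("CURRENCY", pvPredCurrency), ("COMPOSITE", pvPredComposite),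
   ("TX_COUNT", pvPredTxCount)]

-- body of B's loop 'for c in columns: first matching rule gets c (inner for/break = find?)'
def pvBStep (d : PySem.Dict String (List String)) (c : String) : PySem.Dict String (List String) :=
  match pvRules.find? (fun r => r.2 c) with
  | some r => d.modify r.1 [] (fun v => v ++ [c])
  | none => d

def resolve_groups_py_alt (columns : List String) : List (String × List String) :=
  let init : PySem.Dict String (List String) :=
    PySem.Dict.ofList (pvRules.map (fun r => (r.1, ([] : List String))))
  let buckets := columns.foldl pvBStep init
  buckets.items.filter (fun p => !p.2.isEmpty)

-- ===== PRECONDITION & SPEC =====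
def Spec_resolve_groups_py (columns : List String) (out : List (String × List String)) : Prop := out = resolve_groups_py_alt columns
instance (columns : List String) (out : List (String × List String)) : Decidable (Spec_resolve_groups_py columns out) := by unfold Spec_resolve_groups_py; infer_instance

-- ===== CLAIM (what is proved, stated in full; the proofs are below) =====
def Claim_equal_resolve_groups_py : Prop := ∀ (columns : List String), Dom_resolve_groups_py columns → Spec_resolve_groups_py columns (resolve_groups_py columns)

-- ===== LEMMAS AND PROOFS =====

theorem sw_or_in (c p : String) :
    (PySem.Str.startswith c p || PySem.Str.isIn p c) = PySem.Str.isIn p c := by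
  cases h : PySem.Str.startswith c p
  · simp
  · simp
    rw [PySem.Chars.isIn_iff_infix]
    have : p.toList.isPrefixOf c.toList = true := h
    exact (List.IsPrefix.isInfix (List.isPrefixOf_iff_prefix.mp this))

theorem pick_eq (columns pats : List String) :
    pvPick columns pats = columns.filter (fun c => pvHasAny c pats) := by
  unfold pvPick pvHasAny
  apply List.filter_congr
  intro c _
  congr 1
  funext p
  exact sw_or_in c p

-- ===== A side: the dedup loop as a sequential dedup of an association list =====

theorem step_head (k : String) (v : List String) (r : List (String × List String))
    (seen : PySem.Set String) (h : k ∉ r.map Prod.fst) :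
    pvDedupStep (PySem.Dict.mk ((k, v) :: r), seen) k
      = (let kept := v.filter (fun c => !(PySem.Set.contains seen c))
         ((if kept.isEmpty then PySem.Dict.mk r else PySem.Dict.mk ((k, kept) :: r)),
          PySem.Set.update seen kept)) := by
  have hr : ∀ p ∈ r, (p.1 == k) = false := by
    intro p hp; simp; intro he; exact h (he ▸ List.mem_map_of_mem hp)
  have hmap : ∀ w : List String,
      List.map (fun p => if p.1 = k then (k, w) else p) r = r := by
    intro w
    rw [List.map_congr_left (g := id) (fun p hp => by
      simp [show p.1 ≠ k by have := hr p hp; simpa using this])]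
    exact List.map_id r
  simp only [pvDedupStep, PySem.Dict.getD, PySem.Dict.get?, PySem.Dict.insert,
    PySem.Dict.erase, PySem.Dict.contains, List.find?, List.any_cons, beq_self_eq_true]
  simp
  split_ifs with hemp
  · simp [hmap]; exact fun a b hab he => by simpa [he] using hr (a, b) hab
  · simp [hmap]

theorem step_cons (k name : String) (w : List String) (x : List (String × List String))
    (seen : PySem.Set String) (hne : name ≠ k) :
    pvDedupStep (PySem.Dict.mk ((k, w) :: x), seen) name
      = ((PySem.Dict.mk ((k, w) :: (pvDedupStep (PySem.Dict.mk x, seen) name).1.items)),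
         (pvDedupStep (PySem.Dict.mk x, seen) name).2) := by
  simp only [pvDedupStep, PySem.Dict.getD, PySem.Dict.get?, PySem.Dict.insert,
    PySem.Dict.erase, PySem.Dict.contains, List.find?, List.any_cons]
  have hk : (k == name) = false := by simp; exact fun h => hne h.symm
  simp [hk]
  split_ifs <;> simp_all

theorem fold_cons (names : List String) (k : String) (w : List String)
    (x : List (String × List String)) (seen : PySem.Set String) (h : k ∉ names) :
    names.foldl pvDedupStep (PySem.Dict.mk ((k, w) :: x), seen)
      = ((PySem.Dict.mk ((k, w) :: (names.foldl pvDedupStep (PySem.Dict.mk x, seen)).1.items)),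
         (names.foldl pvDedupStep (PySem.Dict.mk x, seen)).2) := by
  induction names generalizing x seen with
  | nil => simp
  | cons n ns ih =>
      simp only [List.foldl_cons]
      rw [step_cons k n w x seen (by simp at h; exact fun he => h.1 he.symm)]
      have := ih ((pvDedupStep (PySem.Dict.mk x, seen) n).1.items)
        ((pvDedupStep (PySem.Dict.mk x, seen) n).2) (by simp at h; exact h.2)
      simpa using this

def pvKeptPairs : List (String × List String) → PySem.Set String → List (String × List String)
  | [], _ => []
  | (k, v) :: r, seen =>
      let kept := v.filter (fun c => !(PySem.Set.contains seen c))
      (k, kept) :: pvKeptPairs r (PySem.Set.update seen kept)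

theorem dedup_loop (ps : List (String × List String)) (seen : PySem.Set String)
    (h : (ps.map Prod.fst).Nodup) :
    ((ps.map Prod.fst).foldl pvDedupStep (PySem.Dict.mk ps, seen)).1.items
      = (pvKeptPairs ps seen).filter (fun p => !p.2.isEmpty) := by
  induction ps generalizing seen with
  | nil => simp [pvKeptPairs]
  | cons p r ih =>
      obtain ⟨k, v⟩ := p
      simp only [List.map_cons, List.foldl_cons]
      simp only [List.map_cons, List.nodup_cons] at h
      have hk : k ∉ r.map Prod.fst := h.1
      have hnd : (r.map Prod.fst).Nodup := h.2
      rw [step_head k v r seen hk]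
      cases hemp : (v.filter (fun c => !(PySem.Set.contains seen c))).isEmpty with
      | true =>
          have hemp' : (List.filter (fun c => !decide (c ∈ seen)) v).isEmpty = true := by
            simpa using hemp
          simp only [hemp, if_true]
          rw [ih _ hnd]
          simp [pvKeptPairs, hemp']
      | false =>
          have hemp' : (List.filter (fun c => !decide (c ∈ seen)) v).isEmpty = false := by
            simpa using hemp
          simp only [hemp, Bool.false_eq_true, if_false]
          rw [fold_cons (r.map Prod.fst) k _ r _ hk]
          rw [ih _ hnd]
          simp [pvKeptPairs, hemp']

def pvNames : List String :=
  ["AMOUNT", "RECEIVER", "PORTFOLIO", "TEMPORAL", "CURRENCY", "COMPOSITE", "TX_COUNT"]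

theorem A_struct (columns : List String) :
    resolve_groups_py columns =
      (pvNames.foldl pvDedupStep
        (PySem.Dict.mk
          [("AMOUNT", (pvPick columns ["amt_", "is_round_amount"]).filter
              (fun c => !(((pvPick columns ["amt_", "is_round_amount"]).filter
                  (fun c => PySem.Str.endswith c "_tx_count")).contains c))),
           ("RECEIVER", pvPick columns ["recv_"]),
           ("PORTFOLIO", pvPick columns ["port_", "tx_share_of_daily_vol", "vol_7d_vs_30d"]),
           ("TEMPORAL", pvPick columns ["is_weekend", "is_off_hours", "seconds_since_last_tx",
                                        "gap_zscore", "tx_count_24h", "velocity_7d_vs_30d"]),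
           ("CURRENCY", pvPick columns ["ccy_", "currency_switched"]),
           ("COMPOSITE", pvPick columns ["flag_"]),
           ("TX_COUNT", (pvPick columns ["amt_", "is_round_amount"]).filter
              (fun c => PySem.Str.endswith c "_tx_count"))],
         PySem.Set.empty)).1.items := by
  unfold resolve_groups_py
  simp [PySem.Dict.insert, PySem.Dict.contains, PySem.Dict.getD, PySem.Dict.get?,
    PySem.Dict.empty, PySem.Dict.keys, pvNames]

theorem tx_eq (columns : List String) :
    (columns.filter (fun c => pvHasAny c ["amt_", "is_round_amount"])).filter
        (fun c => PySem.Str.endswith c "_tx_count")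
      = columns.filter pvPredTxCount := by
  rw [List.filter_filter]
  exact List.filter_congr (fun c _ => by simp [pvPredTxCount, Bool.and_comm])

theorem amt_eq (columns : List String) :
    (columns.filter (fun c => pvHasAny c ["amt_", "is_round_amount"])).filter
        (fun c => !((columns.filter pvPredTxCount).contains c))
      = columns.filter pvPredAmount := by
  rw [List.filter_filter]
  refine List.filter_congr (fun c hc => ?_)
  cases hA : pvHasAny c ["amt_", "is_round_amount"] with
  | false => simp [pvPredAmount, hA]
  | true =>
      have : (columns.filter pvPredTxCount).contains c = pvPredTxCount c := by
        cases hT : pvPredTxCount c with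
        | true => simp [List.mem_filter, hc, hT]
        | false => simp [List.mem_filter, hT]
      simp [pvPredAmount, pvPredTxCount, hA, hc]

theorem A_canon (columns : List String) :
    resolve_groups_py columns =
      (pvKeptPairs
        [("AMOUNT", columns.filter pvPredAmount),
         ("RECEIVER", columns.filter pvPredReceiver),
         ("PORTFOLIO", columns.filter pvPredPortfolio),
         ("TEMPORAL", columns.filter pvPredTemporal),
         ("CURRENCY", columns.filter pvPredCurrency),
         ("COMPOSITE", columns.filter pvPredComposite),
         ("TX_COUNT", columns.filter pvPredTxCount)] PySem.Set.empty).filter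
        (fun p => !p.2.isEmpty) := by
  rw [A_struct]
  rw [show pvPick columns ["amt_", "is_round_amount"]
        = columns.filter (fun c => pvHasAny c ["amt_", "is_round_amount"]) from pick_eq _ _]
  rw [tx_eq, amt_eq]
  rw [pick_eq, pick_eq, pick_eq, pick_eq, pick_eq]
  rw [show (columns.filter fun c => pvHasAny c ["recv_"]) = columns.filter pvPredReceiver from rfl,
      show (columns.filter fun c => pvHasAny c ["port_", "tx_share_of_daily_vol", "vol_7d_vs_30d"])
        = columns.filter pvPredPortfolio from rfl,
      show (columns.filter fun c => pvHasAny c ["is_weekend", "is_off_hours", "seconds_since_last_tx",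
          "gap_zscore", "tx_count_24h", "velocity_7d_vs_30d"]) = columns.filter pvPredTemporal from rfl,
      show (columns.filter fun c => pvHasAny c ["ccy_", "currency_switched"])
        = columns.filter pvPredCurrency from rfl,
      show (columns.filter fun c => pvHasAny c ["flag_"]) = columns.filter pvPredComposite from rfl]
  have heq : ([("AMOUNT", columns.filter pvPredAmount),
         ("RECEIVER", columns.filter pvPredReceiver),
         ("PORTFOLIO", columns.filter pvPredPortfolio),
         ("TEMPORAL", columns.filter pvPredTemporal),
         ("CURRENCY", columns.filter pvPredCurrency),
         ("COMPOSITE", columns.filter pvPredComposite),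
         ("TX_COUNT", columns.filter pvPredTxCount)].map Prod.fst) = pvNames := rfl
  rw [← heq]
  exact dedup_loop _ _ (by rw [heq]; decide)

def pvFM (c : String) : Option String := (pvRules.find? (fun r => r.2 c)).map Prod.fst

theorem b_step_keys (d : PySem.Dict String (List String)) (c : String)
    (h : ∀ r ∈ pvRules, r.1 ∈ d.keys) : (pvBStep d c).keys = d.keys := by
  unfold pvBStep
  cases hf : pvRules.find? (fun r => r.2 c) with
  | none => rfl
  | some r =>
      rw [PySem.Dict.keys_modify, PySem.Dict.keys_insert_of_contains]
      rw [PySem.Dict.contains_iff_mem_keys]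
      exact h r (List.mem_of_find?_eq_some hf)

theorem b_fold_keys (l : List String) (d : PySem.Dict String (List String))
    (h : ∀ r ∈ pvRules, r.1 ∈ d.keys) : (l.foldl pvBStep d).keys = d.keys := by
  induction l generalizing d with
  | nil => rfl
  | cons c cs ih =>
      simp only [List.foldl_cons]
      rw [ih _ (fun r hr => by rw [b_step_keys d c h]; exact h r hr), b_step_keys d c h]

theorem b_fold_getD (l : List String) (d : PySem.Dict String (List String)) (n : String) :
    (l.foldl pvBStep d).getD n [] = d.getD n [] ++ l.filter (fun c => pvFM c == some n) := by
  induction l generalizing d with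
  | nil => simp
  | cons c cs ih =>
      simp only [List.foldl_cons, List.filter_cons]
      rw [ih]
      unfold pvBStep
      cases hf : pvRules.find? (fun r => r.2 c) with
      | none => simp [pvFM, hf]
      | some r =>
          rw [PySem.Dict.getD_modify]
          by_cases hn : n = r.1
          · subst hn
            simp [pvFM, hf]
          · have : (pvFM c == some n) = false := by
              simp [pvFM, hf]; exact fun he => hn he.symm
            simp [this, hn]

theorem alt_eq (columns : List String) :
    resolve_groups_py_alt columns =
      ([("AMOUNT", columns.filter (fun c => pvFM c == some "AMOUNT")),
        ("RECEIVER", columns.filter (fun c => pvFM c == some "RECEIVER")),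
        ("PORTFOLIO", columns.filter (fun c => pvFM c == some "PORTFOLIO")),
        ("TEMPORAL", columns.filter (fun c => pvFM c == some "TEMPORAL")),
        ("CURRENCY", columns.filter (fun c => pvFM c == some "CURRENCY")),
        ("COMPOSITE", columns.filter (fun c => pvFM c == some "COMPOSITE")),
        ("TX_COUNT", columns.filter (fun c => pvFM c == some "TX_COUNT"))]).filter
        (fun p => !p.2.isEmpty) := by
  unfold resolve_groups_py_alt
  dsimp only
  have hinit : ∀ r ∈ pvRules,
      r.1 ∈ (PySem.Dict.ofList (pvRules.map (fun r => (r.1, ([] : List String))))).keys := by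
    decide
  have hkeys := b_fold_keys columns _ hinit
  congr 1
  rw [PySem.Dict.items_eq_map_keys _ (by rw [hkeys]; decide) []]
  rw [hkeys]
  rw [show (PySem.Dict.ofList (pvRules.map (fun r => (r.1, ([] : List String))))).keys = pvNames
    from rfl]
  simp only [pvNames, List.map_cons, List.map_nil]
  simp only [b_fold_getD]
  rfl

def pvQ0 : String → Bool := fun _ => false
def pvQ1 : String → Bool := fun c => pvQ0 c || pvPredAmount c
def pvQ2 : String → Bool := fun c => pvQ1 c || pvPredReceiver c
def pvQ3 : String → Bool := fun c => pvQ2 c || pvPredPortfolio c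
def pvQ4 : String → Bool := fun c => pvQ3 c || pvPredTemporal c
def pvQ5 : String → Bool := fun c => pvQ4 c || pvPredCurrency c
def pvQ6 : String → Bool := fun c => pvQ5 c || pvPredComposite c

theorem fm_elim (rs : List (String × (String → Bool))) (n : String) (c : String)
    (h : n ∉ rs.map Prod.fst) : (((rs.find? (fun r => r.2 c)).map Prod.fst) == some n) = false := by
  cases hf : rs.find? (fun r => r.2 c) with
  | none => rfl
  | some r =>
      have hm := List.mem_of_find?_eq_some hf
      have : r.1 ≠ n := fun he => h (he ▸ List.mem_map_of_mem hm)
      simp [this]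

theorem fm1 (c : String) : (pvFM c == some "AMOUNT") = (pvPredAmount c && !pvQ0 c) := by
  unfold pvFM pvRules
  cases hi : pvPredAmount c with
  | true =>
      rw [List.find?_cons_of_pos (by simp [hi])]
      simp [pvQ0]
  | false =>
      rw [List.find?_cons_of_neg (by simp [hi])]
      rw [fm_elim [("RECEIVER", pvPredReceiver), ("PORTFOLIO", pvPredPortfolio), ("TEMPORAL", pvPredTemporal), ("CURRENCY", pvPredCurrency), ("COMPOSITE", pvPredComposite), ("TX_COUNT", pvPredTxCount)] "AMOUNT" c (by decide)]
      simp

theorem fm2 (c : String) : (pvFM c == some "RECEIVER") = (pvPredReceiver c && !pvQ1 c) := by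
  unfold pvFM pvRules
  cases h1 : pvPredAmount c with
  | true =>
      rw [List.find?_cons_of_pos (by simp [h1])]
      simp [pvQ0,pvQ1,h1]
  | false =>
      rw [List.find?_cons_of_neg (by simp [h1])]
      cases hi : pvPredReceiver c with
      | true =>
          rw [List.find?_cons_of_pos (by simp [hi])]
          simp [pvQ0,pvQ1,h1]
      | false =>
          rw [List.find?_cons_of_neg (by simp [hi])]
          rw [fm_elim [("PORTFOLIO", pvPredPortfolio), ("TEMPORAL", pvPredTemporal), ("CURRENCY", pvPredCurrency), ("COMPOSITE", pvPredComposite), ("TX_COUNT", pvPredTxCount)] "RECEIVER" c (by decide)]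
          simp

theorem fm3 (c : String) : (pvFM c == some "PORTFOLIO") = (pvPredPortfolio c && !pvQ2 c) := by
  unfold pvFM pvRules
  cases h1 : pvPredAmount c with
  | true =>
      rw [List.find?_cons_of_pos (by simp [h1])]
      simp [pvQ0,pvQ1,pvQ2,h1]
  | false =>
      rw [List.find?_cons_of_neg (by simp [h1])]
      cases h2 : pvPredReceiver c with
      | true =>
          rw [List.find?_cons_of_pos (by simp [h2])]
          simp [pvQ0,pvQ1,pvQ2,h1,h2]
      | false =>
          rw [List.find?_cons_of_neg (by simp [h2])]
          cases hi : pvPredPortfolio c with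
          | true =>
              rw [List.find?_cons_of_pos (by simp [hi])]
              simp [pvQ0,pvQ1,pvQ2,h1,h2]
          | false =>
              rw [List.find?_cons_of_neg (by simp [hi])]
              rw [fm_elim [("TEMPORAL", pvPredTemporal), ("CURRENCY", pvPredCurrency), ("COMPOSITE", pvPredComposite), ("TX_COUNT", pvPredTxCount)] "PORTFOLIO" c (by decide)]
              simp

theorem fm4 (c : String) : (pvFM c == some "TEMPORAL") = (pvPredTemporal c && !pvQ3 c) := by
  unfold pvFM pvRules
  cases h1 : pvPredAmount c with
  | true =>
      rw [List.find?_cons_of_pos (by simp [h1])]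
      simp [pvQ0,pvQ1,pvQ2,pvQ3,h1]
  | false =>
      rw [List.find?_cons_of_neg (by simp [h1])]
      cases h2 : pvPredReceiver c with
      | true =>
          rw [List.find?_cons_of_pos (by simp [h2])]
          simp [pvQ0,pvQ1,pvQ2,pvQ3,h1,h2]
      | false =>
          rw [List.find?_cons_of_neg (by simp [h2])]
          cases h3 : pvPredPortfolio c with
          | true =>
              rw [List.find?_cons_of_pos (by simp [h3])]
              simp [pvQ0,pvQ1,pvQ2,pvQ3,h1,h2,h3]
          | false =>
              rw [List.find?_cons_of_neg (by simp [h3])]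
              cases hi : pvPredTemporal c with
              | true =>
                  rw [List.find?_cons_of_pos (by simp [hi])]
                  simp [pvQ0,pvQ1,pvQ2,pvQ3,h1,h2,h3]
              | false =>
                  rw [List.find?_cons_of_neg (by simp [hi])]
                  rw [fm_elim [("CURRENCY", pvPredCurrency), ("COMPOSITE", pvPredComposite), ("TX_COUNT", pvPredTxCount)] "TEMPORAL" c (by decide)]
                  simp

theorem fm5 (c : String) : (pvFM c == some "CURRENCY") = (pvPredCurrency c && !pvQ4 c) := by
  unfold pvFM pvRules
  cases h1 : pvPredAmount c with
  | true =>
      rw [List.find?_cons_of_pos (by simp [h1])]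
      simp [pvQ0,pvQ1,pvQ2,pvQ3,pvQ4,h1]
  | false =>
      rw [List.find?_cons_of_neg (by simp [h1])]
      cases h2 : pvPredReceiver c with
      | true =>
          rw [List.find?_cons_of_pos (by simp [h2])]
          simp [pvQ0,pvQ1,pvQ2,pvQ3,pvQ4,h1,h2]
      | false =>
          rw [List.find?_cons_of_neg (by simp [h2])]
          cases h3 : pvPredPortfolio c with
          | true =>
              rw [List.find?_cons_of_pos (by simp [h3])]
              simp [pvQ0,pvQ1,pvQ2,pvQ3,pvQ4,h1,h2,h3]
          | false =>
              rw [List.find?_cons_of_neg (by simp [h3])]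
              cases h4 : pvPredTemporal c with
              | true =>
                  rw [List.find?_cons_of_pos (by simp [h4])]
                  simp [pvQ0,pvQ1,pvQ2,pvQ3,pvQ4,h1,h2,h3,h4]
              | false =>
                  rw [List.find?_cons_of_neg (by simp [h4])]
                  cases hi : pvPredCurrency c with
                  | true =>
                      rw [List.find?_cons_of_pos (by simp [hi])]
                      simp [pvQ0,pvQ1,pvQ2,pvQ3,pvQ4,h1,h2,h3,h4]
                  | false =>
                      rw [List.find?_cons_of_neg (by simp [hi])]
                      rw [fm_elim [("COMPOSITE", pvPredComposite), ("TX_COUNT", pvPredTxCount)] "CURRENCY" c (by decide)]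
                      simp

theorem fm6 (c : String) : (pvFM c == some "COMPOSITE") = (pvPredComposite c && !pvQ5 c) := by
  unfold pvFM pvRules
  cases h1 : pvPredAmount c with
  | true =>
      rw [List.find?_cons_of_pos (by simp [h1])]
      simp [pvQ0,pvQ1,pvQ2,pvQ3,pvQ4,pvQ5,h1]
  | false =>
      rw [List.find?_cons_of_neg (by simp [h1])]
      cases h2 : pvPredReceiver c with
      | true =>
          rw [List.find?_cons_of_pos (by simp [h2])]
          simp [pvQ0,pvQ1,pvQ2,pvQ3,pvQ4,pvQ5,h1,h2]
      | false =>
          rw [List.find?_cons_of_neg (by simp [h2])]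
          cases h3 : pvPredPortfolio c with
          | true =>
              rw [List.find?_cons_of_pos (by simp [h3])]
              simp [pvQ0,pvQ1,pvQ2,pvQ3,pvQ4,pvQ5,h1,h2,h3]
          | false =>
              rw [List.find?_cons_of_neg (by simp [h3])]
              cases h4 : pvPredTemporal c with
              | true =>
                  rw [List.find?_cons_of_pos (by simp [h4])]
                  simp [pvQ0,pvQ1,pvQ2,pvQ3,pvQ4,pvQ5,h1,h2,h3,h4]
              | false =>
                  rw [List.find?_cons_of_neg (by simp [h4])]
                  cases h5 : pvPredCurrency c with
                  | true =>
                      rw [List.find?_cons_of_pos (by simp [h5])]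
                      simp [pvQ0,pvQ1,pvQ2,pvQ3,pvQ4,pvQ5,h1,h2,h3,h4,h5]
                  | false =>
                      rw [List.find?_cons_of_neg (by simp [h5])]
                      cases hi : pvPredComposite c with
                      | true =>
                          rw [List.find?_cons_of_pos (by simp [hi])]
                          simp [pvQ0,pvQ1,pvQ2,pvQ3,pvQ4,pvQ5,h1,h2,h3,h4,h5]
                      | false =>
                          rw [List.find?_cons_of_neg (by simp [hi])]
                          rw [fm_elim [("TX_COUNT", pvPredTxCount)] "COMPOSITE" c (by decide)]
                          simp

theorem fm7 (c : String) : (pvFM c == some "TX_COUNT") = (pvPredTxCount c && !pvQ6 c) := by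
  unfold pvFM pvRules
  cases h1 : pvPredAmount c with
  | true =>
      rw [List.find?_cons_of_pos (by simp [h1])]
      simp [pvQ0,pvQ1,pvQ2,pvQ3,pvQ4,pvQ5,pvQ6,h1]
  | false =>
      rw [List.find?_cons_of_neg (by simp [h1])]
      cases h2 : pvPredReceiver c with
      | true =>
          rw [List.find?_cons_of_pos (by simp [h2])]
          simp [pvQ0,pvQ1,pvQ2,pvQ3,pvQ4,pvQ5,pvQ6,h1,h2]
      | false =>
          rw [List.find?_cons_of_neg (by simp [h2])]
          cases h3 : pvPredPortfolio c with
          | true =>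
              rw [List.find?_cons_of_pos (by simp [h3])]
              simp [pvQ0,pvQ1,pvQ2,pvQ3,pvQ4,pvQ5,pvQ6,h1,h2,h3]
          | false =>
              rw [List.find?_cons_of_neg (by simp [h3])]
              cases h4 : pvPredTemporal c with
              | true =>
                  rw [List.find?_cons_of_pos (by simp [h4])]
                  simp [pvQ0,pvQ1,pvQ2,pvQ3,pvQ4,pvQ5,pvQ6,h1,h2,h3,h4]
              | false =>
                  rw [List.find?_cons_of_neg (by simp [h4])]
                  cases h5 : pvPredCurrency c with
                  | true =>
                      rw [List.find?_cons_of_pos (by simp [h5])]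
                      simp [pvQ0,pvQ1,pvQ2,pvQ3,pvQ4,pvQ5,pvQ6,h1,h2,h3,h4,h5]
                  | false =>
                      rw [List.find?_cons_of_neg (by simp [h5])]
                      cases h6 : pvPredComposite c with
                      | true =>
                          rw [List.find?_cons_of_pos (by simp [h6])]
                          simp [pvQ0,pvQ1,pvQ2,pvQ3,pvQ4,pvQ5,pvQ6,h1,h2,h3,h4,h5,h6]
                      | false =>
                          rw [List.find?_cons_of_neg (by simp [h6])]
                          cases hi : pvPredTxCount c with
                          | true =>
                              rw [List.find?_cons_of_pos (by simp [hi])]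
                              simp [pvQ0,pvQ1,pvQ2,pvQ3,pvQ4,pvQ5,pvQ6,h1,h2,h3,h4,h5,h6]
                          | false =>
                              rw [List.find?_cons_of_neg (by simp [hi])]
                              rw [fm_elim [] "TX_COUNT" c (by decide)]
                              simp

theorem pvKeptPairs_cons (k : String) (v : List String) (r : List (String × List String))
    (seen : PySem.Set String) :
    pvKeptPairs ((k, v) :: r) seen
      = (k, v.filter (fun c => !(PySem.Set.contains seen c)))
        :: pvKeptPairs r (PySem.Set.update seen (v.filter (fun c => !(PySem.Set.contains seen c)))) := rfl

theorem kept_step (columns : List String) (seen : PySem.Set String) (q w : String → Bool)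
    (h : ∀ c ∈ columns, PySem.Set.contains seen c = q c) :
    (columns.filter w).filter (fun c => !(PySem.Set.contains seen c))
      = columns.filter (fun c => w c && !q c) := by
  rw [List.filter_filter]
  exact List.filter_congr (fun c hc => by rw [h c hc, Bool.and_comm])

theorem inv_step (columns : List String) (seen : PySem.Set String) (q w : String → Bool)
    (h : ∀ c ∈ columns, PySem.Set.contains seen c = q c) :
    ∀ c ∈ columns,
      PySem.Set.contains (PySem.Set.update seen (columns.filter (fun c => w c && !q c))) c
        = (q c || w c) := by
  intro c hc
  have m1 : c ∈ seen ↔ q c = true := by rw [← PySem.Set.contains_iff, h c hc]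
  rw [Bool.eq_iff_iff]
  simp only [PySem.Set.contains_iff, PySem.Set.mem_update, List.mem_filter, m1,
    Bool.or_eq_true, Bool.and_eq_true]
  cases hq : q c <;> cases hw : w c <;> simp [hc]

theorem kept_eq (columns : List String) :
    pvKeptPairs
        [("AMOUNT", columns.filter pvPredAmount),
         ("RECEIVER", columns.filter pvPredReceiver),
         ("PORTFOLIO", columns.filter pvPredPortfolio),
         ("TEMPORAL", columns.filter pvPredTemporal),
         ("CURRENCY", columns.filter pvPredCurrency),
         ("COMPOSITE", columns.filter pvPredComposite),
         ("TX_COUNT", columns.filter pvPredTxCount)] PySem.Set.empty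
      = [("AMOUNT", columns.filter (fun c => pvPredAmount c && !pvQ0 c)),
         ("RECEIVER", columns.filter (fun c => pvPredReceiver c && !pvQ1 c)),
         ("PORTFOLIO", columns.filter (fun c => pvPredPortfolio c && !pvQ2 c)),
         ("TEMPORAL", columns.filter (fun c => pvPredTemporal c && !pvQ3 c)),
         ("CURRENCY", columns.filter (fun c => pvPredCurrency c && !pvQ4 c)),
         ("COMPOSITE", columns.filter (fun c => pvPredComposite c && !pvQ5 c)),
         ("TX_COUNT", columns.filter (fun c => pvPredTxCount c && !pvQ6 c))] := by
  have h0 : ∀ c ∈ columns, PySem.Set.contains PySem.Set.empty c = pvQ0 c := fun c _ => rfl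
  rw [pvKeptPairs_cons, kept_step columns _ pvQ0 pvPredAmount h0]
  have h1 : ∀ c ∈ columns, PySem.Set.contains
      (PySem.Set.update PySem.Set.empty (columns.filter (fun c => pvPredAmount c && !pvQ0 c))) c
      = pvQ1 c := inv_step columns _ pvQ0 pvPredAmount h0
  rw [pvKeptPairs_cons, kept_step columns _ pvQ1 pvPredReceiver h1]
  have h2 := inv_step columns _ pvQ1 pvPredReceiver h1
  rw [pvKeptPairs_cons, kept_step columns _ pvQ2 pvPredPortfolio h2]
  have h3 := inv_step columns _ pvQ2 pvPredPortfolio h2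
  rw [pvKeptPairs_cons, kept_step columns _ pvQ3 pvPredTemporal h3]
  have h4 := inv_step columns _ pvQ3 pvPredTemporal h3
  rw [pvKeptPairs_cons, kept_step columns _ pvQ4 pvPredCurrency h4]
  have h5 := inv_step columns _ pvQ4 pvPredCurrency h4
  rw [pvKeptPairs_cons, kept_step columns _ pvQ5 pvPredComposite h5]
  have h6 := inv_step columns _ pvQ5 pvPredComposite h5
  rw [pvKeptPairs_cons, kept_step columns _ pvQ6 pvPredTxCount h6]
  rfl

-- ===== VERDICT (by name: the statement is the Claim_ definition above) =====
theorem resolve_groups_py_spec : Claim_equal_resolve_groups_py := by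
  intro columns _
  show resolve_groups_py columns = resolve_groups_py_alt columns
  rw [A_canon, kept_eq, alt_eq]
  rw [show (fun c => pvFM c == some "AMOUNT") = (fun c => pvPredAmount c && !pvQ0 c) from funext fm1,
      show (fun c => pvFM c == some "RECEIVER") = (fun c => pvPredReceiver c && !pvQ1 c) from funext fm2,
      show (fun c => pvFM c == some "PORTFOLIO") = (fun c => pvPredPortfolio c && !pvQ2 c) from funext fm3,
      show (fun c => pvFM c == some "TEMPORAL") = (fun c => pvPredTemporal c && !pvQ3 c) from funext fm4,
      show (fun c => pvFM c == some "CURRENCY") = (fun c => pvPredCurrency c && !pvQ4 c) from funext fm5,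
      show (fun c => pvFM c == some "COMPOSITE") = (fun c => pvPredComposite c && !pvQ5 c) from funext fm6,
      show (fun c => pvFM c == some "TX_COUNT") = (fun c => pvPredTxCount c && !pvQ6 c) from funext fm7]
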